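-- pv_equiv track=rewrite | github.com/Mdixit/Hackerrank | algorithms/puz.py | calc_val
-- ===== SOURCE A (Python) =====
-- def calc_val(iput):
--     if(len(iput)==1):
--         return 0
--     pt = 0
--     sum_l = iput[0]
--     sum_r = sum(iput[1:])
--
--     for j in range(1, len(iput)):
--         if(j ==0):
--             continue
--         if(sum_l == sum_r):
--             pt = 1 + max(calc_val(iput[j:]),calc_val(iput[:j]))
--             break
--         if(sum_l != sum_r):
--
--             sum_l += iput[j]
--             sum_r -= iput[j]
--
--     return pt
-- ===== SOURCE B (Python) =====
-- def calc_val(iput):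
--     # Iterative: one prefix-sum pass, a dict from prefix value to its (ascending)
--     # positions, binary search for each split point, and an explicit stack that
--     # tracks depth (answer = max depth of an unsplittable segment).
--     n = len(iput)
--     pre = [0]
--     for x in iput:
--         pre.append(pre[-1] + x)
--     where = {}
--     for j in range(n + 1):
--         where.setdefault(pre[j], []).append(j)
--     best = 0
--     stack = [(0, n, 0)]
--     while stack:
--         lo, hi, d = stack.pop()
--         j = None
--         if lo + 1 < hi:
--             t = pre[lo] + pre[hi]
--             if t % 2 == 0:
--                 cand = where.get(t // 2, [])
--                 a, b = 0, len(cand)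
--                 while a < b:
--                     m = (a + b) // 2
--                     if cand[m] <= lo:
--                         a = m + 1
--                     else:
--                         b = m
--                 if a < len(cand) and cand[a] < hi:
--                     j = cand[a]
--         if j is None:
--             if d > best:
--                 best = d
--         else:
--             stack.append((j, hi, d + 1))
--             stack.append((lo, j, d + 1))
--     return best
-- ===== Notes on version B (the rewrite author's own statement) =====
-- stated objective: alternative
-- what changed: B replaces A's recursion with 1+max over slices by an iterative explicit stack of (lo,hi,depth) segments whose answer is the maximum depth of an unsplittable segment, and finds each split point by a dict from prefix-sum value to its positions plus a hand-written binary search instead of A's linear re-summing scan.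
import Mathlib
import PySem

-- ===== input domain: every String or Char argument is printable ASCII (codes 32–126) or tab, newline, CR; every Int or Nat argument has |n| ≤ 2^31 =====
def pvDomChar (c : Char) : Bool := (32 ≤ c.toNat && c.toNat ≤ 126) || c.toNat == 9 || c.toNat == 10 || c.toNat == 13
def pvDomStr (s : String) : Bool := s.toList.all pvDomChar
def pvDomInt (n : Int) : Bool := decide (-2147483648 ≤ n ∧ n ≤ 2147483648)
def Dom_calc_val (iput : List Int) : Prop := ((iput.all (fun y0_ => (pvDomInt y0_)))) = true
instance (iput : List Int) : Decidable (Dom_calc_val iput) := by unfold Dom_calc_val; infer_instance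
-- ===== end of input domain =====

-- B replaces A's recursive first-balanced-split/1+max computation by an explicit
-- stack over (lo, hi, depth) segments (answer = max depth of an unsplittable
-- segment), finding split points via a prefix-value→positions dict and a
-- binary search (objective: alternative; not measured faster).

-- ===== PORT A =====
-- A's loop 'for j in range(1, len(iput))' carries (sum_l, sum_r) and breaks at
-- the first balanced split; k encodes j = k+1 (the loop starts at j = 1).
-- iput[j:] / iput[:j] with 0 ≤ j < len are exactly List.drop j / List.take j;
-- iput[j] with j < len is exactly getD j 0.  The dead 'if j == 0: continue'
-- branch is unreachable and omitted.  On [] Python raises IndexError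
-- reading its first element; the port returns 0 there (excluded by Pre_).  The fuel argument is
-- only a structural-totality guard (depth ≤ len+1, loop steps ≤ segment
-- length); it guards the recursion, never switches algorithms.
def pvALoop (recur : List Int → Int) : Nat → List Int → Nat → Int → Int → Int
  | 0, _, _, _, _ => 0
  | g + 1, iput, k, sum_l, sum_r =>
    if k + 1 < iput.length then
      if sum_l = sum_r then
        1 + max (recur (iput.drop (k+1))) (recur (iput.take (k+1)))
      else
        pvALoop recur g iput (k+1) (sum_l + iput.getD (k+1) 0) (sum_r - iput.getD (k+1) 0)
    else 0

def pvCalcA : Nat → List Int → Int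
  | 0, _ => 0
  | fuel + 1, iput =>
    if iput.length = 1 then 0
    else
      match iput with
      | [] => 0                                 -- Python: IndexError (outside Pre_)
      | x :: rest => pvALoop (pvCalcA fuel) (x :: rest).length (x :: rest) 0 x rest.sum

def calc_val (iput : List Int) : Int :=
  pvCalcA (iput.length + 1) iput

-- ===== PORT B =====
-- pre = prefix sums of iput, built once by Source B's left-to-right append loop.
def pvPre (iput : List Int) : List Int :=
  (iput.foldl (fun (acc : List Int × Int) x => (acc.1 ++ [acc.2 + x], acc.2 + x)) ([0], 0)).1

-- where: dict from prefix value to the ascending list of its positions,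
-- built by Source B's 'for j in range(n + 1): where.setdefault(pre[j], []).append(j)'
-- (setdefault+append at key k is exactly modify k [] (· ++ [j])); positions are
-- Nat internally (they are the nonnegative ints 0..n).
def pvWhere (pre : List Int) : PySem.Dict Int (List Nat) :=
  ((List.range pre.length).map (fun j => (pre.getD j 0, j))).foldl
    (fun d p => d.modify p.1 [] (· ++ [p.2])) PySem.Dict.empty

-- Source B's hand-written binary search loop 'while a < b: …' (returns final a);
-- fuel = b - a bounds the iteration count, it never switches algorithms.
def pvFirstGT (cand : List Nat) (x : Nat) : Nat → Nat → Nat → Nat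
  | 0, a, _ => a
  | g + 1, a, b =>
    if a < b then
      if cand.getD ((a + b) / 2) 0 ≤ x then pvFirstGT cand x g ((a + b) / 2 + 1) b
      else pvFirstGT cand x g a ((a + b) / 2)
    else a

-- the body of Source B's 'j = None; if lo + 1 < hi: …' block computing the split point
def pvFindJ (pre : List Int) (wd : PySem.Dict Int (List Nat)) (lo hi : Nat) : Option Nat :=
  if lo + 1 < hi then
    let t := pre.getD lo 0 + pre.getD hi 0
    if PySem.Int.mod t 2 = 0 then
      let cand := wd.getD (PySem.Int.floordiv t 2) []
      let a := pvFirstGT cand lo cand.length 0 cand.length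
      if a < cand.length ∧ cand.getD a 0 < hi then some (cand.getD a 0) else none
    else none
  else none

-- Source B's 'while stack:' loop; the stack top is the list head (python appends
-- (j,hi,d+1) then (lo,j,d+1) and pops the last, so (lo,j,d+1) is consed last).
-- 't % 2 == 0' and 't // 2' are PySem.Int.mod / floordiv.  The fuel bounds the
-- number of iterations (each pop splits a segment into strictly smaller ones).
def pvStackRun (pre : List Int) (wd : PySem.Dict Int (List Nat)) :
    Nat → List (Nat × Nat × Int) → Int → Int
  | 0, _, best => best
  | _, [], best => best
  | g + 1, (lo, hi, d) :: rest, best =>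
    match pvFindJ pre wd lo hi with
    | none => pvStackRun pre wd g rest (if d > best then d else best)
    | some j => pvStackRun pre wd g ((lo, j, d + 1) :: (j, hi, d + 1) :: rest) best

def calc_val_alt (iput : List Int) : Int :=
  pvStackRun (pvPre iput) (pvWhere (pvPre iput)) (3 ^ iput.length + 1)
    [(0, iput.length, 0)] 0

-- ===== PRECONDITION & SPEC =====
-- Pre_ excludes only the empty list, on which A raises IndexError reading its first element.
def Pre_calc_val (iput : List Int) : Prop := iput ≠ []
instance (iput : List Int) : Decidable (Pre_calc_val iput) := by unfold Pre_calc_val; infer_instance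
def pvWitness_calc_val : List Int := [1, -1, 0, 2, 1, 1]

def Spec_calc_val (iput : List Int) (out : Int) : Prop := out = calc_val_alt iput
instance (iput : List Int) (out : Int) : Decidable (Spec_calc_val iput out) := by unfold Spec_calc_val; infer_instance

-- ===== CLAIM (what is proved, stated in full; the proofs are below) =====
def Claim_equal_calc_val : Prop := ∀ (iput : List Int), Dom_calc_val iput → Pre_calc_val iput → Spec_calc_val iput (calc_val iput)

-- ===== LEMMAS AND PROOFS =====

-- the common spec both ports are reduced to: firstJ scans for the first
-- balanced split point, Gspec is the recursive segment value
def firstJ (pre : List Int) (t : Int) (hi : Nat) (s : Nat) : Option Nat :=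
  if s < hi then
    if 2 * pre.getD s 0 = t then some s else firstJ pre t hi (s + 1)
  else none
termination_by hi - s

theorem firstJ_of_ge (pre : List Int) (t : Int) (hi s : Nat) (h : hi ≤ s) :
    firstJ pre t hi s = none := by
  rw [firstJ]; simp [Nat.not_lt.mpr h]

theorem firstJ_some (pre : List Int) (t : Int) (hi : Nat) :
    ∀ s j, firstJ pre t hi s = some j →
      s ≤ j ∧ j < hi ∧ 2 * pre.getD j 0 = t ∧
        (∀ i, s ≤ i → i < j → 2 * pre.getD i 0 ≠ t) := by
  intro s
  induction hk : hi - s using Nat.strong_induction_on generalizing s with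
  | _ k ih =>
    intro j hj
    rw [firstJ] at hj
    by_cases hs : s < hi
    · rw [if_pos hs] at hj
      by_cases hb : 2 * pre.getD s 0 = t
      · rw [if_pos hb] at hj
        cases hj
        exact ⟨le_rfl, hs, hb, fun i h1 h2 => by omega⟩
      · rw [if_neg hb] at hj
        obtain ⟨h1, h2, h3, h4⟩ := ih (hi - (s+1)) (by omega) (s+1) rfl j hj
        refine ⟨by omega, h2, h3, fun i hi1 hi2 => ?_⟩
        rcases Nat.eq_or_lt_of_le hi1 with rfl | h
        · exact hb
        · exact h4 i h hi2
    · rw [if_neg hs] at hj; cases hj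

theorem firstJ_eq_some_of (pre : List Int) (t : Int) (hi : Nat) :
    ∀ s j, s ≤ j → j < hi → 2 * pre.getD j 0 = t →
      (∀ i, s ≤ i → i < j → 2 * pre.getD i 0 ≠ t) →
      firstJ pre t hi s = some j := by
  intro s
  induction hk : hi - s using Nat.strong_induction_on generalizing s with
  | _ k ih =>
    intro j h1 h2 h3 h4
    rw [firstJ, if_pos (by omega)]
    rcases Nat.eq_or_lt_of_le h1 with rfl | h
    · rw [if_pos h3]
    · rw [if_neg (h4 s le_rfl h)]
      exact ih (hi - (s+1)) (by omega) (s+1) rfl j h h2 h3 (fun i a b => h4 i (by omega) b)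

theorem firstJ_eq_none_of (pre : List Int) (t : Int) (hi : Nat) :
    ∀ s, (∀ i, s ≤ i → i < hi → 2 * pre.getD i 0 ≠ t) →
      firstJ pre t hi s = none := by
  intro s
  induction hk : hi - s using Nat.strong_induction_on generalizing s with
  | _ k ih =>
    intro h
    rw [firstJ]
    by_cases hs : s < hi
    · rw [if_pos hs, if_neg (h s le_rfl hs)]
      exact ih (hi - (s+1)) (by omega) (s+1) rfl (fun i a b => h i (by omega) b)
    · rw [if_neg hs]

def Gspec (pre : List Int) (lo hi : Nat) : Int :=
  match h : firstJ pre (pre.getD lo 0 + pre.getD hi 0) hi (lo + 1) with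
  | some j => 1 + max (Gspec pre j hi) (Gspec pre lo j)
  | none => 0
termination_by hi - lo
decreasing_by
  · have := firstJ_some pre _ hi (lo + 1) j h; omega
  · have := firstJ_some pre _ hi (lo + 1) j h; omega

theorem Gspec_nonneg (pre : List Int) : ∀ lo hi, 0 ≤ Gspec pre lo hi := by
  intro lo hi
  induction hk : hi - lo using Nat.strong_induction_on generalizing lo hi with
  | _ k ih =>
    rw [Gspec]
    split
    · next j h =>
      obtain ⟨h1, h2, _, _⟩ := firstJ_some pre _ hi (lo+1) j h
      have := ih (hi - j) (by omega) j hi rfl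
      have := le_max_left (Gspec pre j hi) (Gspec pre lo j)
      omega
    · exact le_rfl


-- ---- A-side machinery (old inner-loop/segment recursion, now proof-side) ----
def pvGoBLoop (recur : Nat → Nat → Int) : Nat → List Int → Nat → Nat → Nat → Int
  | 0, _, _, _, _ => 0
  | g + 1, pre, lo, hi, d =>
    if lo + d + 1 < hi then
      if 2 * pre.getD (lo + d + 1) 0 = pre.getD lo 0 + pre.getD hi 0 then
        1 + max (recur (lo + d + 1) hi) (recur lo (lo + d + 1))
      else
        pvGoBLoop recur g pre lo hi (d + 1)
    else 0

def pvGoB : Nat → List Int → Nat → Nat → Int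
  | 0, _, _, _ => 0
  | fuel + 1, pre, lo, hi =>
    if hi ≤ lo + 1 then 0
    else pvGoBLoop (pvGoB fuel pre) (hi - lo) pre lo hi 0

theorem pvPre_fold (l : List Int) (acc : List Int) (s : Int) :
    l.foldl (fun (a : List Int × Int) x => (a.1 ++ [a.2 + x], a.2 + x)) (acc, s)
      = (acc ++ (List.range l.length).map (fun k => s + (l.take (k+1)).sum), s + l.sum) := by
  induction l generalizing acc s with
  | nil => simp
  | cons x t ih =>
    simp only [List.foldl_cons, ih, List.length_cons, List.range_succ_eq_map, List.map_cons,
      List.map_map, List.take_succ_cons, List.sum_cons]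
    refine Prod.ext ?_ (by simp; ring)
    simp [add_assoc]

theorem pvPre_eq (l : List Int) :
    pvPre l = (List.range (l.length+1)).map (fun k => (l.take k).sum) := by
  unfold pvPre
  rw [pvPre_fold]
  simp [List.range_succ_eq_map, List.map_map, Function.comp]

theorem pvPre_length (l : List Int) : (pvPre l).length = l.length + 1 := by
  rw [pvPre_eq]; simp

theorem pvPre_getD (l : List Int) (j : Nat) (hj : j ≤ l.length) :
    (pvPre l).getD j 0 = (l.take j).sum := by
  rw [pvPre_eq, List.getD_eq_getElem?_getD]
  simp [Nat.lt_succ_of_le hj]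

theorem pv_seg_len (iput : List Int) (lo hi : Nat) (hhi : hi ≤ iput.length) :
    ((iput.drop lo).take (hi - lo)).length = hi - lo := by
  simp [List.length_take, List.length_drop]
  omega

theorem pv_take_seg (iput : List Int) (lo hi d : Nat) (hd : d ≤ hi - lo) :
    ((iput.drop lo).take (hi - lo)).take d = (iput.drop lo).take d := by
  rw [List.take_take]; congr 1; omega

theorem pv_drop_seg (iput : List Int) (lo hi d : Nat) :
    ((iput.drop lo).take (hi - lo)).drop d = (iput.drop (lo + d)).take (hi - lo - d) := by
  rw [List.drop_take, List.drop_drop]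

theorem pv_sum_take_add (l : List Int) (a b : Nat) :
    (l.take (a + b)).sum = (l.take a).sum + ((l.drop a).take b).sum := by
  rw [List.take_add, List.sum_append]

theorem pv_sl (iput : List Int) (lo hi d : Nat) (hd : d + 1 ≤ hi - lo) :
    (((iput.drop lo).take (hi - lo)).take (d+1)).sum
      = (iput.take (lo + d + 1)).sum - (iput.take lo).sum := by
  rw [pv_take_seg iput lo hi (d+1) hd]
  have : lo + d + 1 = lo + (d + 1) := by omega
  rw [this, pv_sum_take_add iput lo (d+1)]; ring

theorem pv_sr (iput : List Int) (lo hi d : Nat) (hd : lo + d + 1 ≤ hi) :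
    (((iput.drop lo).take (hi - lo)).drop (d+1)).sum
      = (iput.take hi).sum - (iput.take (lo + d + 1)).sum := by
  rw [pv_drop_seg]
  have h1 : hi = (lo + (d + 1)) + (hi - lo - (d+1)) := by omega
  have := pv_sum_take_add iput (lo + (d+1)) (hi - lo - (d+1))
  rw [← h1] at this
  have h2 : lo + d + 1 = lo + (d + 1) := by omega
  rw [h2]
  omega

theorem pv_loop (iput : List Int) (lo hi : Nat) (hhi : hi ≤ iput.length)
    (recA : List Int → Int) (recB : Nat → Nat → Int)
    (hrec : ∀ lo' hi', lo' < hi' → hi' ≤ iput.length →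
      recA ((iput.drop lo').take (hi' - lo')) = recB lo' hi') :
    ∀ g d,
      pvALoop recA g ((iput.drop lo).take (hi - lo)) d
          ((((iput.drop lo).take (hi - lo)).take (d+1)).sum)
          ((((iput.drop lo).take (hi - lo)).drop (d+1)).sum)
        = pvGoBLoop recB g (pvPre iput) lo hi d := by
  intro g
  induction g with
  | zero => intro d; rfl
  | succ g ihg =>
    intro d
    rw [pvALoop, pv_seg_len iput lo hi hhi, pvGoBLoop]
    by_cases hg : lo + d + 1 < hi
    · rw [if_pos (by omega), if_pos hg]
      have esl := pv_sl iput lo hi d (by omega)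
      have esr := pv_sr iput lo hi d (by omega)
      have eP1 := pvPre_getD iput (lo + d + 1) (by omega)
      have eP2 := pvPre_getD iput lo (by omega)
      have eP3 := pvPre_getD iput hi hhi
      have hiff : ((((iput.drop lo).take (hi - lo)).take (d+1)).sum
            = (((iput.drop lo).take (hi - lo)).drop (d+1)).sum)
          ↔ (2 * (pvPre iput).getD (lo + d + 1) 0
              = (pvPre iput).getD lo 0 + (pvPre iput).getD hi 0) := by
        rw [esl, esr, eP1, eP2, eP3]
        omega
      by_cases hc : (((iput.drop lo).take (hi - lo)).take (d+1)).sum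
          = (((iput.drop lo).take (hi - lo)).drop (d+1)).sum
      · rw [if_pos hc, if_pos (hiff.mp hc)]
        congr 1
        have eL : ((iput.drop lo).take (hi - lo)).take (d+1)
            = (iput.drop lo).take ((lo + d + 1) - lo) := by
          rw [pv_take_seg iput lo hi (d+1) (by omega)]; congr 1; omega
        have eR : ((iput.drop lo).take (hi - lo)).drop (d+1)
            = (iput.drop (lo + d + 1)).take (hi - (lo + d + 1)) := by
          rw [pv_drop_seg]; congr 1; omega
        rw [eL, eR, hrec (lo + d + 1) hi (by omega) hhi,
            hrec lo (lo + d + 1) (by omega) (by omega)]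
      · rw [if_neg hc, if_neg (fun h => hc (hiff.mpr h))]
        have hlen : d + 1 < ((iput.drop lo).take (hi - lo)).length := by
          rw [pv_seg_len iput lo hi hhi]; omega
        have egetD : ((iput.drop lo).take (hi - lo)).getD (d+1) 0
            = ((iput.drop lo).take (hi - lo))[d+1]'hlen := List.getD_eq_getElem _ _ hlen
        have etake : (((iput.drop lo).take (hi - lo)).take (d+1+1)).sum
            = (((iput.drop lo).take (hi - lo)).take (d+1)).sum
              + ((iput.drop lo).take (hi - lo)).getD (d+1) 0 := by
          rw [egetD, List.take_add_one, List.sum_append]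
          simp [List.getElem?_eq_getElem hlen]
        have edrop : (((iput.drop lo).take (hi - lo)).drop (d+1+1)).sum
            = (((iput.drop lo).take (hi - lo)).drop (d+1)).sum
              - ((iput.drop lo).take (hi - lo)).getD (d+1) 0 := by
          rw [egetD, List.drop_eq_getElem_cons hlen]
          simp
        have := ihg (d+1)
        rw [etake, edrop] at this
        exact this
    · rw [if_neg (by omega), if_neg hg]

theorem pv_main (iput : List Int) : ∀ fuel lo hi, lo < hi → hi ≤ iput.length →
    pvCalcA fuel ((iput.drop lo).take (hi - lo)) = pvGoB fuel (pvPre iput) lo hi := by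
  intro fuel
  induction fuel with
  | zero => intro lo hi _ _; rfl
  | succ f ih =>
    intro lo hi hlt hhi
    have hlen := pv_seg_len iput lo hi hhi
    rcases hseg : (iput.drop lo).take (hi - lo) with _ | ⟨x, rest⟩
    · exfalso; rw [hseg] at hlen; simp at hlen; omega
    · rw [hseg] at hlen
      have hr : rest.length + 1 = hi - lo := by simpa using hlen
      rw [pvCalcA, pvGoB]
      by_cases h1 : hi = lo + 1
      · rw [if_pos (by simp only [List.length_cons]; omega), if_pos (by omega)]
      · rw [if_neg (by simp only [List.length_cons]; omega), if_neg (by omega)]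
        have key := pv_loop iput lo hi hhi (pvCalcA f) (pvGoB f (pvPre iput))
          (fun lo' hi' a b => ih lo' hi' a b) (hi - lo) 0
        rw [hseg] at key
        rw [show (x :: rest).length = hi - lo from by simpa using hr]
        simpa using key

-- ---- the segment recursion equals Gspec ----
theorem loop_firstJ (pre : List Int) (lo hi : Nat) (recB : Nat → Nat → Int) :
    ∀ g d, hi ≤ lo + d + g →
    pvGoBLoop recB g pre lo hi d =
      match firstJ pre (pre.getD lo 0 + pre.getD hi 0) hi (lo + d + 1) with
      | some j => 1 + max (recB j hi) (recB lo j)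
      | none => 0 := by
  intro g
  induction g with
  | zero =>
    intro d h
    rw [firstJ_of_ge pre _ hi (lo + d + 1) (by omega)]
    rfl
  | succ g ihg =>
    intro d h
    rw [pvGoBLoop]
    by_cases hg : lo + d + 1 < hi
    · rw [if_pos hg, firstJ, if_pos hg]
      by_cases hb : 2 * pre.getD (lo + d + 1) 0 = pre.getD lo 0 + pre.getD hi 0
      · rw [if_pos hb, if_pos hb]
      · rw [if_neg hb, if_neg hb]
        have := ihg (d + 1) (by omega)
        rw [this]
        have : lo + d + 1 + 1 = lo + (d + 1) + 1 := by omega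
        rw [this]
    · rw [if_neg hg, firstJ_of_ge pre _ hi (lo + d + 1) (by omega)]

theorem goB_eq_Gspec (pre : List Int) :
    ∀ k lo hi f, hi - lo ≤ k → hi ≤ lo + f + 1 →
    pvGoB (f + 1) pre lo hi = Gspec pre lo hi := by
  intro k
  induction k using Nat.strong_induction_on with
  | _ k ih =>
    intro lo hi f hk hf
    rw [pvGoB, Gspec]
    by_cases h1 : hi ≤ lo + 1
    · rw [if_pos h1, firstJ_of_ge pre _ hi (lo + 1) (by omega)]
    · rw [if_neg h1]
      have hloop := loop_firstJ pre lo hi (pvGoB f pre) (hi - lo) 0 (by omega)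
      have e0 : lo + 0 + 1 = lo + 1 := by omega
      rw [e0] at hloop
      rw [hloop]
      rcases hfj : firstJ pre (pre.getD lo 0 + pre.getD hi 0) hi (lo + 1) with _ | j
      · rfl
      · obtain ⟨hj1, hj2, _, _⟩ := firstJ_some pre _ hi (lo + 1) j hfj
        obtain ⟨f', rfl⟩ : ∃ f', f = f' + 1 := ⟨f - 1, by omega⟩
        dsimp only
        rw [ih (hi - j) (by omega) j hi f' (by omega) (by omega),
            ih (j - lo) (by omega) lo j f' (by omega) (by omega)]

-- ---- the dict of prefix positions ----
theorem getD_pvWhere (pre : List Int) (v : Int) :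
    (pvWhere pre).getD v [] = (List.range pre.length).filter (fun j => pre.getD j 0 == v) := by
  unfold pvWhere
  rw [PySem.Dict.getD_foldl_modify_append]
  rw [PySem.Dict.getD_empty]
  rw [List.filter_map]
  simp [Function.comp_def, List.map_id']

-- ---- the binary search ----
theorem fg_spec (cand : List Nat) (x : Nat)
    (hmono : ∀ i k, i < k → k < cand.length → cand.getD i 0 < cand.getD k 0) :
    ∀ g a b, a ≤ b → b ≤ cand.length → b - a ≤ g →
      (∀ i, i < a → cand.getD i 0 ≤ x) →
      (∀ i, b ≤ i → i < cand.length → x < cand.getD i 0) →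
      (∀ i, i < pvFirstGT cand x g a b → cand.getD i 0 ≤ x) ∧
      (∀ i, pvFirstGT cand x g a b ≤ i → i < cand.length → x < cand.getD i 0) ∧
      pvFirstGT cand x g a b ≤ cand.length := by
  intro g
  induction g with
  | zero =>
    intro a b hab hbl hg h1 h2
    have : a = b := by omega
    subst this
    exact ⟨fun i hi => h1 i hi, fun i hi hil => h2 i hi hil, hbl⟩
  | succ g ihg =>
    intro a b hab hbl hg h1 h2
    rw [pvFirstGT]
    by_cases hlt : a < b
    · rw [if_pos hlt]
      by_cases hm : cand.getD ((a + b) / 2) 0 ≤ x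
      · rw [if_pos hm]
        refine ihg ((a + b) / 2 + 1) b (by omega) hbl (by omega) ?_ h2
        intro i hi
        rcases Nat.lt_or_ge i ((a + b) / 2) with h | h
        · exact le_trans (le_of_lt (hmono i ((a + b) / 2) h (by omega))) hm
        · have : i = (a + b) / 2 := by omega
          subst this; exact hm
      · rw [if_neg hm]
        refine ihg a ((a + b) / 2) (by omega) (by omega) (by omega) h1 ?_
        intro i hi hil
        rcases Nat.lt_or_ge ((a + b) / 2) i with h | h
        · exact lt_trans (Nat.lt_of_not_le hm) (hmono ((a + b) / 2) i h hil)
        · have : i = (a + b) / 2 := by omega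
          subst this; exact Nat.lt_of_not_le hm
    · rw [if_neg hlt]
      have : a = b := by omega
      subst this
      exact ⟨fun i hi => h1 i hi, fun i hi hil => h2 i hi hil, hbl⟩

-- ---- the split-point computation equals firstJ ----
theorem findJ_eq_firstJ (pre : List Int) (lo hi : Nat) (hhi : hi < pre.length) :
    pvFindJ pre (pvWhere pre) lo hi
      = firstJ pre (pre.getD lo 0 + pre.getD hi 0) hi (lo + 1) := by
  unfold pvFindJ
  by_cases hlt : lo + 1 < hi
  · rw [if_pos hlt]
    set t := pre.getD lo 0 + pre.getD hi 0 with ht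
    by_cases hev : PySem.Int.mod t 2 = 0
    · rw [if_pos hev]
      set v := PySem.Int.floordiv t 2 with hv
      have h2v : 2 * v = t := by
        have := PySem.Int.floordiv_mul_add_mod t 2
        omega
      set cand := (pvWhere pre).getD v [] with hcand
      have hcf : cand = (List.range pre.length).filter (fun j => pre.getD j 0 == v) :=
        getD_pvWhere pre v
      have hmem : ∀ i, i ∈ cand ↔ i < pre.length ∧ pre.getD i 0 = v := by
        intro i; rw [hcf]; simp [List.mem_filter, List.mem_range]
      have hpw : cand.Pairwise (· < ·) := by
        rw [hcf]; exact (List.pairwise_lt_range).filter _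
      have hmono : ∀ i k, i < k → k < cand.length → cand.getD i 0 < cand.getD k 0 := by
        intro i k hik hkl
        rw [List.getD_eq_getElem cand 0 (by omega), List.getD_eq_getElem cand 0 hkl]
        exact List.pairwise_iff_getElem.mp hpw i k (by omega) hkl hik
      obtain ⟨H1, H2, H3⟩ := fg_spec cand lo hmono cand.length 0 cand.length
        (Nat.zero_le _) le_rfl (by omega) (by omega) (by omega)
      set r := pvFirstGT cand lo cand.length 0 cand.length with hr
      have hbal : ∀ i, 2 * pre.getD i 0 = t ↔ pre.getD i 0 = v := by
        intro i; omega
      by_cases hcond : r < cand.length ∧ cand.getD r 0 < hi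
      · rw [if_pos hcond]
        obtain ⟨hrl, hrh⟩ := hcond
        set j := cand.getD r 0 with hj
        have hjmem : j ∈ cand := by
          rw [hj, List.getD_eq_getElem cand 0 hrl]; exact List.getElem_mem _
        have hjv := ((hmem j).mp hjmem).2
        have hjlo : lo < j := H2 r le_rfl hrl
        refine (firstJ_eq_some_of pre t hi (lo + 1) j (by omega) hrh
          ((hbal j).mpr hjv) ?_).symm
        intro i hi1 hi2 hbi
        have hiv := (hbal i).mp hbi
        have himem : i ∈ cand := (hmem i).mpr ⟨by omega, hiv⟩
        obtain ⟨k, hkl, hki⟩ := List.getElem_of_mem himem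
        have hkd : cand.getD k 0 = i := by rw [List.getD_eq_getElem cand 0 hkl, hki]
        rcases Nat.lt_or_ge k r with h | h
        · have := H1 k h; omega
        · rcases Nat.eq_or_lt_of_le h with rfl | h'
          · omega
          · have := hmono r k h' hkl; omega
      · rw [if_neg hcond]
        refine (firstJ_eq_none_of pre t hi (lo + 1) ?_).symm
        intro i hi1 hi2 hbi
        have hiv := (hbal i).mp hbi
        have himem : i ∈ cand := (hmem i).mpr ⟨by omega, hiv⟩
        obtain ⟨k, hkl, hki⟩ := List.getElem_of_mem himem
        have hkd : cand.getD k 0 = i := by rw [List.getD_eq_getElem cand 0 hkl, hki]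
        have hklo : lo < i := by omega
        have hkr : r ≤ k := by
          by_contra h
          have := H1 k (by omega); omega
        have hrl : r < cand.length := by omega
        have hrle : cand.getD r 0 ≤ i := by
          rcases Nat.eq_or_lt_of_le hkr with rfl | h'
          · omega
          · have := hmono r k h' hkl; omega
        have : ¬ cand.getD r 0 < hi := fun h => hcond ⟨hrl, h⟩
        omega
    · rw [if_neg hev]
      refine (firstJ_eq_none_of pre t hi (lo + 1) ?_).symm
      intro i _ _ hbi
      have : (2 : Int) ∣ t := ⟨pre.getD i 0, by omega⟩
      exact hev ((PySem.Int.mod_eq_zero_iff_dvd t 2).mpr this)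
  · rw [if_neg hlt, firstJ_of_ge pre _ hi (lo + 1) (by omega)]

-- ---- the stack loop computes Gspec ----
theorem pow3_split (a b : Nat) (ha : 1 ≤ a) (hb : 1 ≤ b) :
    3 ^ a + 3 ^ b + 1 ≤ 3 ^ (a + b) := by
  have hA : 3 ≤ 3 ^ a := by
    calc 3 = 3 ^ 1 := by norm_num
    _ ≤ 3 ^ a := Nat.pow_le_pow_right (by norm_num) ha
  have hB : 3 ≤ 3 ^ b := by
    calc 3 = 3 ^ 1 := by norm_num
    _ ≤ 3 ^ b := Nat.pow_le_pow_right (by norm_num) hb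
  have : 3 ^ (a + b) = 3 ^ a * 3 ^ b := by rw [pow_add]
  nlinarith

theorem stack_run (pre : List Int) :
    ∀ fuel st best,
      (st.map (fun it => 3 ^ (it.2.1 - it.1))).sum ≤ fuel →
      (∀ it ∈ st, it.2.1 < pre.length) →
      pvStackRun pre (pvWhere pre) fuel st best
        = st.foldl (fun b it => max b (it.2.2 + Gspec pre it.1 it.2.1)) best := by
  intro fuel
  induction fuel with
  | zero =>
    intro st best hm _
    rcases st with _ | ⟨⟨lo, hi, d⟩, rest⟩
    · rfl
    · exfalso
      simp only [List.map_cons, List.sum_cons] at hm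
      have : 1 ≤ 3 ^ (hi - lo) := Nat.one_le_pow _ _ (by norm_num)
      omega
  | succ g ihg =>
    intro st best hm hin
    rcases st with _ | ⟨⟨lo, hi, d⟩, rest⟩
    · rfl
    · simp only [List.map_cons, List.sum_cons] at hm
      have hone : 1 ≤ 3 ^ (hi - lo) := Nat.one_le_pow _ _ (by norm_num)
      have hhi : hi < pre.length := hin _ (List.mem_cons_self ..)
      rw [pvStackRun, findJ_eq_firstJ pre lo hi hhi]
      rcases hfj : firstJ pre (pre.getD lo 0 + pre.getD hi 0) hi (lo + 1) with _ | j
      · -- leaf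
        have hG : Gspec pre lo hi = 0 := by rw [Gspec, hfj]
        rw [ihg rest _ (by omega) (fun it h => hin it (List.mem_cons_of_mem _ h))]
        simp only [List.foldl_cons]
        congr 1
        rw [hG]
        split_ifs <;> omega
      · -- split
        obtain ⟨hj1, hj2, _, _⟩ := firstJ_some pre _ hi (lo + 1) j hfj
        have hG : Gspec pre lo hi = 1 + max (Gspec pre j hi) (Gspec pre lo j) := by
          rw [Gspec, hfj]
        have hpow := pow3_split (j - lo) (hi - j) (by omega) (by omega)
        have hsum : j - lo + (hi - j) = hi - lo := by omega
        rw [hsum] at hpow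
        dsimp only
        rw [ihg ((lo, j, d + 1) :: (j, hi, d + 1) :: rest) best
          (by simp only [List.map_cons, List.sum_cons]; omega)
          (by
            intro it hit
            simp only [List.mem_cons] at hit
            rcases hit with rfl | rfl | hit
            · dsimp only; omega
            · exact hhi
            · exact hin it (List.mem_cons_of_mem _ hit))]
        simp only [List.foldl_cons]
        congr 1
        rw [hG]
        omega

-- ===== VERDICT =====
theorem calc_val_spec : Claim_equal_calc_val := by
  intro iput _ hpre
  unfold Spec_calc_val calc_val calc_val_alt
  have hn : 0 < iput.length := by
    cases iput
    · exact absurd rfl hpre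
    · simp
  -- A side: calc_val = Gspec
  have hA : pvCalcA (iput.length + 1) iput = Gspec (pvPre iput) 0 iput.length := by
    have h := pv_main iput (iput.length + 1) 0 iput.length hn le_rfl
    have h2 := goB_eq_Gspec (pvPre iput) iput.length 0 iput.length iput.length
      (by omega) (by omega)
    rw [h2] at h
    simpa using h
  -- B side: calc_val_alt = Gspec
  have hB : pvStackRun (pvPre iput) (pvWhere (pvPre iput)) (3 ^ iput.length + 1)
      [(0, iput.length, 0)] 0 = Gspec (pvPre iput) 0 iput.length := by
    rw [stack_run (pvPre iput) (3 ^ iput.length + 1) [(0, iput.length, 0)] 0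
      (by simp) (by intro it hit; simp at hit; subst hit; simp [pvPre_length]) ]
    simp only [List.foldl_cons, List.foldl_nil]
    have := Gspec_nonneg (pvPre iput) 0 iput.length
    omega
  rw [hA, hB]
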